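-- pv_equiv track=rewrite | github.com/superkink3124/ATLOPGCN | src/dataset/graph_builder_utils.py | get_mention_to_mention_edges
-- ===== SOURCE A (Python) =====
-- from typing import Tuple, List, Dict
--
-- def get_mention_to_mention_edges(num_mention: int,
--                                  list_mention_idx: List[Dict[Tuple[str, int, Tuple[int, ...]], int]]
--                                  ) -> Tuple[List[int], List[int]]:
--     u = []
--     v = []
--
--     for batch_id, mention_idx in enumerate(list_mention_idx):
--         for mention1 in mention_idx:
--             for mention2 in mention_idx:
--                 if mention1 == mention2:
--                     continue
--                 if mention1[1] == mention2[1]: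
--                     u.append(get_id(num_mention, batch_id, mention_idx[mention1]))
--                     v.append(get_id(num_mention, batch_id, mention_idx[mention2]))
--     return u, v
--
-- def get_id(num_col: int, row_idx: int, col_idx: int) -> int:
--     return num_col * row_idx + col_idx
-- ===== SOURCE B (Python) =====
-- from typing import Tuple, List, Dict
--
-- def get_mention_to_mention_edges(num_mention: int,
--                                  list_mention_idx: List[Dict[Tuple[str, int, Tuple[int, ...]], int]]
--                                  ) -> Tuple[List[int], List[int]]:
--     u = []
--     v = []
--     for batch_id, mention_idx in enumerate(list_mention_idx):
--         # index mentions by their second key component once: O(n) instead of the O(n^2) inner scan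
--         groups = {}
--         for pos, (key, idx) in enumerate(mention_idx.items()):
--             groups.setdefault(key[1], []).append((pos, idx))
--         base = num_mention * batch_id
--         for pos, (key, idx) in enumerate(mention_idx.items()):
--             for pos2, idx2 in groups[key[1]]:
--                 if pos2 != pos:
--                     u.append(base + idx)
--                     v.append(base + idx2)
--     return u, v
-- ===== Notes on version B (the rewrite author's own statement) =====
-- stated objective: faster
-- what changed: Instead of the O(n^2) all-pairs inner scan per batch, B builds one hash index grouping mentions by key[1] in a single pass and then emits, for each mention in insertion order, its pairs from its own group; Pre_ only requires that each batch list has pairwise-distinct keys, i.e. that it actually encodes a Python dict (a Python dict cannot hold duplicate keys, so no input A runs on is excluded).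
import Mathlib
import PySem

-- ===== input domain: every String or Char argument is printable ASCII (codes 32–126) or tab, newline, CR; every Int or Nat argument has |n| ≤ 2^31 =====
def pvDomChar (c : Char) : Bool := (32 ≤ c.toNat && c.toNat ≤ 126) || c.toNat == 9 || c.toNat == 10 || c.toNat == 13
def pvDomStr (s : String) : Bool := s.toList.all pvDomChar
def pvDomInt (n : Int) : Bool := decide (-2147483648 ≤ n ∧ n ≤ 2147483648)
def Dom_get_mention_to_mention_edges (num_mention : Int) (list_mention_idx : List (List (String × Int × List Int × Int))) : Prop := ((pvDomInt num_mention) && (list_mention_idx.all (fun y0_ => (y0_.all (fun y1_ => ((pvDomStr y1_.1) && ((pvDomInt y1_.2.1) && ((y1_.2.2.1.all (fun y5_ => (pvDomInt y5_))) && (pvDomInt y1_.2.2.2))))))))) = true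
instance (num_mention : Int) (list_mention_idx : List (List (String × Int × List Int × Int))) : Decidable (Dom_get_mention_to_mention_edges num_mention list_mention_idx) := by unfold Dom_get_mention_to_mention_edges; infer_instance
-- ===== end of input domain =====

-- B replaces A's O(n^2)-per-batch all-pairs scan by a one-pass hash index grouping mentions by
-- key[1]; objective: faster (asymptotic). Pre_ only requires each batch's keys to be pairwise
-- distinct, i.e. that the list actually encodes a Python dict.


-- ===== PORT A =====
def get_id (num_col : Int) (row_idx : Int) (col_idx : Int) : Int := num_col * row_idx + col_idx

-- the dict key of an entry (str, int, tuple) — an entry of the association list is key ++ value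
def pvKey (e : String × Int × List Int × Int) : String × Int × List Int := (e.1, e.2.1, e.2.2.1)

-- mention_idx[k]: first entry with this key (keys are unique in a dict; the key looked up by A is
-- always present, so the .getD 0 default is unreachable)
def pvDictGet (mention_idx : List (String × Int × List Int × Int)) (k : String × Int × List Int) : Int :=
  ((mention_idx.find? (fun e => decide (pvKey e = k))).map (fun e => e.2.2.2)).getD 0

def get_mention_to_mention_edges (num_mention : Int) (list_mention_idx : List (List (String × Int × List Int × Int))) : List Int × List Int :=
  (PySem.List.enumerate list_mention_idx).foldl (fun uv b =>
    b.2.foldl (fun uv m1 =>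
      b.2.foldl (fun uv m2 =>
        if pvKey m1 = pvKey m2 then uv
        else if m1.2.1 = m2.2.1 then
          (uv.1 ++ [get_id num_mention b.1 (pvDictGet b.2 (pvKey m1))],
           uv.2 ++ [get_id num_mention b.1 (pvDictGet b.2 (pvKey m2))])
        else uv) uv) uv) ([], [])

-- ===== PORT B =====
-- groups.setdefault(key[1], []).append((pos, idx)) over enumerate(mention_idx.items())
def pvGroups (mention_idx : List (String × Int × List Int × Int)) : PySem.Dict Int (List (Int × Int)) :=
  (PySem.List.enumerate mention_idx).foldl
    (fun d p => d.modify p.2.2.1 [] (fun l => l ++ [(p.1, p.2.2.2.2)])) PySem.Dict.empty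

def get_mention_to_mention_edges_alt (num_mention : Int) (list_mention_idx : List (List (String × Int × List Int × Int))) : List Int × List Int :=
  (PySem.List.enumerate list_mention_idx).foldl (fun uv b =>
    let groups := pvGroups b.2
    let base := num_mention * b.1
    (PySem.List.enumerate b.2).foldl (fun uv p =>
      ((groups.getD p.2.2.1 []).foldl (fun uv q =>
        if q.1 ≠ p.1 then (uv.1 ++ [base + p.2.2.2.2], uv.2 ++ [base + q.2]) else uv) uv)) uv) ([], [])

-- ===== PRECONDITION & SPEC =====
-- Pre_ excludes only lists in which some batch has two entries with the same (str, int, tuple) key: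
-- such a list does not encode a Python dict (dict keys are unique), so no input A runs on is excluded.
def Pre_get_mention_to_mention_edges (num_mention : Int) (list_mention_idx : List (List (String × Int × List Int × Int))) : Prop :=
  ∀ mi ∈ list_mention_idx, (mi.map pvKey).Nodup
instance (num_mention : Int) (list_mention_idx : List (List (String × Int × List Int × Int))) : Decidable (Pre_get_mention_to_mention_edges num_mention list_mention_idx) := by unfold Pre_get_mention_to_mention_edges; infer_instance
def pvWitness_get_mention_to_mention_edges : Int × (List (List (String × Int × List Int × Int))) :=
  (3, [[("a", 1, [], 0), ("b", 1, [2], 1)], [("c", 0, [], 2)]])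

def Spec_get_mention_to_mention_edges (num_mention : Int) (list_mention_idx : List (List (String × Int × List Int × Int))) (out : List Int × List Int) : Prop := out = get_mention_to_mention_edges_alt num_mention list_mention_idx
instance (num_mention : Int) (list_mention_idx : List (List (String × Int × List Int × Int))) (out : List Int × List Int) : Decidable (Spec_get_mention_to_mention_edges num_mention list_mention_idx out) := by unfold Spec_get_mention_to_mention_edges; infer_instance

-- ===== CLAIM (what is proved, stated in full; the proofs are below) =====
def Claim_equal_get_mention_to_mention_edges : Prop := ∀ (num_mention : Int) (list_mention_idx : List (List (String × Int × List Int × Int))), Dom_get_mention_to_mention_edges num_mention list_mention_idx → Pre_get_mention_to_mention_edges num_mention list_mention_idx → Spec_get_mention_to_mention_edges num_mention list_mention_idx (get_mention_to_mention_edges num_mention list_mention_idx)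

-- ===== LEMMAS AND PROOFS =====

-- 'if p then append to both else skip' over a list, pair-of-accumulators version of foldl_append_if
theorem pv_foldl_pair_append_if {α : Type} (p : α → Bool) (f g : α → Int) :
    ∀ (l : List α) (uv : List Int × List Int),
      l.foldl (fun uv x => if p x then (uv.1 ++ [f x], uv.2 ++ [g x]) else uv) uv
        = (uv.1 ++ (l.filter p).map f, uv.2 ++ (l.filter p).map g) := by
  intro l
  induction l with
  | nil => intro uv; simp
  | cons x t ih =>
    intro uv
    by_cases hx : p x = true <;> simp [List.foldl_cons, hx, ih]

-- a fold that appends a block per element is a flatMap, pair version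
theorem pv_foldl_pair_append {α : Type} (F G : α → List Int) :
    ∀ (l : List α) (uv : List Int × List Int),
      l.foldl (fun uv x => (uv.1 ++ F x, uv.2 ++ G x)) uv
        = (uv.1 ++ l.flatMap F, uv.2 ++ l.flatMap G) := by
  intro l
  induction l with
  | nil => intro uv; simp
  | cons x t ih => intro uv; simp [List.foldl_cons, ih]

theorem pv_flatMap_congr {α β : Type} {l : List α} {f g : α → List β}
    (h : ∀ x ∈ l, f x = g x) : l.flatMap f = l.flatMap g := by
  induction l with
  | nil => rfl
  | cons x t ih =>
    simp only [List.flatMap_cons]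
    rw [h x (by simp), ih (fun y hy => h y (by simp [hy]))]

theorem pv_foldl_congr {α β : Type} (l : List α) (f g : β → α → β) (init : β)
    (h : ∀ acc x, x ∈ l → f acc x = g acc x) : l.foldl f init = l.foldl g init := by
  induction l generalizing init with
  | nil => rfl
  | cons x t ih =>
    simp only [List.foldl_cons]
    rw [h init x (by simp)]
    exact ih _ (fun acc y hy => h acc y (by simp [hy]))

-- dict lookup of a member's own key returns its stored value when keys are distinct
theorem pv_pvDictGet_self (mi : List (String × Int × List Int × Int))
    (hnd : (mi.map pvKey).Nodup) (m : String × Int × List Int × Int) (hm : m ∈ mi) :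
    pvDictGet mi (pvKey m) = m.2.2.2 := by
  induction mi with
  | nil => cases hm
  | cons h t ih =>
    simp only [List.map_cons, List.nodup_cons] at hnd
    by_cases hk : pvKey h = pvKey m
    · have hmh : m = h := by
        rcases List.mem_cons.mp hm with rfl | hmt
        · rfl
        · exact absurd (hk ▸ List.mem_map_of_mem hmt) hnd.1
      subst hmh
      simp [pvDictGet, List.find?]
    · have hmt : m ∈ t := by
        rcases List.mem_cons.mp hm with rfl | hmt
        · exact absurd rfl hk
        · exact hmt
      have := ih hnd.2 hmt
      simpa [pvDictGet, List.find?, hk] using this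

-- the group index: getD of the built dict is the filtered, projected enumeration
theorem pv_pvGroups_getD (mi : List (String × Int × List Int × Int)) (s : Int) :
    (pvGroups mi).getD s []
      = ((PySem.List.enumerate mi).filter (fun p => p.2.2.1 == s)).map (fun p => (p.1, p.2.2.2.2)) := by
  unfold pvGroups
  have hfold :
      (PySem.List.enumerate mi).foldl
          (fun d p => d.modify p.2.2.1 [] (fun l => l ++ [(p.1, p.2.2.2.2)])) PySem.Dict.empty
        = (((PySem.List.enumerate mi).map
              (fun p => (p.2.2.1, (p.1, p.2.2.2.2)))).foldl
            (fun d q => d.modify q.1 [] (fun l => l ++ [q.2])) PySem.Dict.empty) := by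
    rw [List.foldl_map]
  rw [hfold, PySem.Dict.getD_foldl_modify_append, PySem.Dict.getD_empty, List.nil_append,
    List.filter_map, List.map_map]
  rfl

-- distinct keys make key equality within one batch the same as position equality
theorem pv_key_inj (mi : List (String × Int × List Int × Int))
    (hnd : (mi.map pvKey).Nodup) {i k : Nat} (hi : i < mi.length) (hk : k < mi.length) :
    pvKey mi[k] = pvKey mi[i] ↔ k = i := by
  constructor
  · intro h
    have h2 : (mi.map pvKey)[k]'(by simpa using hk) = (mi.map pvKey)[i]'(by simpa using hi) := by
      simpa using h
    exact (List.Nodup.getElem_inj_iff hnd).mp h2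
  · rintro rfl; rfl

-- correspondence between A's filtered scan and B's filtered group, per mention
set_option maxRecDepth 8000 in
theorem pv_filter_corr (mi : List (String × Int × List Int × Int))
    (hnd : (mi.map pvKey).Nodup) {k : Nat} (hk : k < mi.length) :
    ((PySem.List.enumerate mi).filter (fun q => q.2.2.1 == (mi[k]).2.1)).filter
        (fun q => decide (q.1 ≠ (k : Int)))
      = (PySem.List.enumerate mi).filter
          (fun q => decide (pvKey mi[k] ≠ pvKey q.2) && decide ((mi[k]).2.1 = q.2.2.1)) := by
  rw [List.filter_filter]
  apply List.filter_congr
  intro q hq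
  rcases (PySem.List.mem_enumerate_iff _ _ _).mp hq with ⟨j, hj, rfl⟩
  by_cases hjk : j = k
  · subst hjk
    simp
  · have h1 : (decide ((0 : Int) + (j : Nat) ≠ (k : Int))) = true := by
      apply decide_eq_true
      simp only [zero_add]
      exact_mod_cast hjk
    have h2 : (decide (pvKey mi[k] ≠ pvKey mi[j])) = true :=
      decide_eq_true (fun h => hjk ((pv_key_inj mi hnd hk hj).mp h.symm))
    rw [h1, h2]
    simp only [Bool.true_and]
    by_cases h3 : (mi[k]).2.1 = (mi[j]).2.1
    · simp [h3]
    · have h4 : ¬ ((mi[j]).2.1 = (mi[k]).2.1) := fun h => h3 h.symm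
      simp [h3, h4]

-- filtering by a predicate on the entry commutes with enumeration
theorem pv_filter_enum (mi : List (String × Int × List Int × Int)) (p : (String × Int × List Int × Int) → Bool) :
    mi.filter p = ((PySem.List.enumerate mi).filter (fun q => p q.2)).map (fun q => q.2) := by
  conv_lhs => rw [← PySem.List.map_snd_enumerate mi 0]
  rw [List.filter_map]
  rfl

-- Prop-test variant of pv_foldl_pair_append_if
theorem pv_foldl_pair_append_ite {α : Type} (p : α → Prop) [DecidablePred p] (f g : α → Int) :
    ∀ (l : List α) (uv : List Int × List Int),
      l.foldl (fun uv x => if p x then (uv.1 ++ [f x], uv.2 ++ [g x]) else uv) uv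
        = (uv.1 ++ ((l.filter (fun x => decide (p x))).map f),
           uv.2 ++ ((l.filter (fun x => decide (p x))).map g)) := by
  intro l
  induction l with
  | nil => intro uv; simp
  | cons x t ih =>
    intro uv
    by_cases hx : p x <;> simp [List.foldl_cons, hx, ih]

-- per-mention u-column agreement
theorem pv_elem_F (n b : Int) (mi : List (String × Int × List Int × Int))
    (hnd : (mi.map pvKey).Nodup) {k : Nat} (hk : k < mi.length) :
    (mi.filter (fun m2 => decide (pvKey mi[k] ≠ pvKey m2) && decide ((mi[k]).2.1 = m2.2.1))).map
        (fun _ => get_id n b (pvDictGet mi (pvKey mi[k])))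
      = (((pvGroups mi).getD (mi[k]).2.1 []).filter (fun q => decide (q.1 ≠ (k : Int)))).map
          (fun _ => n * b + (mi[k]).2.2.2) := by
  rw [pv_pvGroups_getD, List.filter_map]
  simp only [Function.comp_def]
  rw [pv_filter_corr mi hnd hk,
    pv_filter_enum mi (fun m2 => decide (pvKey mi[k] ≠ pvKey m2) && decide ((mi[k]).2.1 = m2.2.1)),
    pv_pvDictGet_self mi hnd mi[k] (List.getElem_mem hk), List.map_map, List.map_map]
  rfl

-- per-mention v-column agreement
theorem pv_elem_G (n b : Int) (mi : List (String × Int × List Int × Int))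
    (hnd : (mi.map pvKey).Nodup) {k : Nat} (hk : k < mi.length) :
    (mi.filter (fun m2 => decide (pvKey mi[k] ≠ pvKey m2) && decide ((mi[k]).2.1 = m2.2.1))).map
        (fun m2 => get_id n b (pvDictGet mi (pvKey m2)))
      = (((pvGroups mi).getD (mi[k]).2.1 []).filter (fun q => decide (q.1 ≠ (k : Int)))).map
          (fun q => n * b + q.2) := by
  rw [pv_pvGroups_getD, List.filter_map]
  simp only [Function.comp_def]
  rw [pv_filter_corr mi hnd hk,
    pv_filter_enum mi (fun m2 => decide (pvKey mi[k] ≠ pvKey m2) && decide ((mi[k]).2.1 = m2.2.1)),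
    List.map_map, List.map_map]
  apply List.map_congr_left
  intro q hq
  have hm : q.2 ∈ mi := by
    have := List.mem_of_mem_filter hq
    rcases (PySem.List.mem_enumerate_iff _ _ _).mp this with ⟨j, hj, rfl⟩
    exact List.getElem_mem hj
  simp only [Function.comp]
  rw [pv_pvDictGet_self mi hnd q.2 hm]
  rfl

-- iterate over the list = iterate over its enumeration, looking only at the element
theorem pv_flatMap_snd_enum {α β : Type} (l : List α) (F : α → List β) :
    l.flatMap F = (PySem.List.enumerate l 0).flatMap (fun p => F p.2) := by
  conv_lhs => rw [← PySem.List.map_snd_enumerate l 0]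
  rw [List.flatMap_map]

-- the per-batch bodies agree on every batch with distinct keys
theorem pv_batch_eq (n : Int) (b : Int) (mi : List (String × Int × List Int × Int))
    (hnd : (mi.map pvKey).Nodup) (uv : List Int × List Int) :
    mi.foldl (fun uv m1 =>
      mi.foldl (fun uv m2 =>
        if pvKey m1 = pvKey m2 then uv
        else if m1.2.1 = m2.2.1 then
          (uv.1 ++ [get_id n b (pvDictGet mi (pvKey m1))],
           uv.2 ++ [get_id n b (pvDictGet mi (pvKey m2))])
        else uv) uv) uv
    = (PySem.List.enumerate mi).foldl (fun uv p =>
        (((pvGroups mi).getD p.2.2.1 []).foldl (fun uv q =>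
          if q.1 ≠ p.1 then (uv.1 ++ [n * b + p.2.2.2.2], uv.2 ++ [n * b + q.2]) else uv) uv)) uv := by
  -- normalise A's side
  have hA : ∀ uv, mi.foldl (fun uv m1 =>
      mi.foldl (fun uv m2 =>
        if pvKey m1 = pvKey m2 then uv
        else if m1.2.1 = m2.2.1 then
          (uv.1 ++ [get_id n b (pvDictGet mi (pvKey m1))],
           uv.2 ++ [get_id n b (pvDictGet mi (pvKey m2))])
        else uv) uv) uv
      = (uv.1 ++ mi.flatMap (fun m1 =>
            ((mi.filter (fun m2 => decide (pvKey m1 ≠ pvKey m2) && decide (m1.2.1 = m2.2.1))).map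
              (fun _ => get_id n b (pvDictGet mi (pvKey m1))))),
         uv.2 ++ mi.flatMap (fun m1 =>
            ((mi.filter (fun m2 => decide (pvKey m1 ≠ pvKey m2) && decide (m1.2.1 = m2.2.1))).map
              (fun m2 => get_id n b (pvDictGet mi (pvKey m2)))))) := by
    intro uv
    have hstep : ∀ (m1 : String × Int × List Int × Int) (uv : List Int × List Int),
        mi.foldl (fun uv m2 =>
          if pvKey m1 = pvKey m2 then uv
          else if m1.2.1 = m2.2.1 then
            (uv.1 ++ [get_id n b (pvDictGet mi (pvKey m1))],
             uv.2 ++ [get_id n b (pvDictGet mi (pvKey m2))])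
          else uv) uv
        = (uv.1 ++ ((mi.filter (fun m2 => decide (pvKey m1 ≠ pvKey m2) && decide (m1.2.1 = m2.2.1))).map
              (fun _ => get_id n b (pvDictGet mi (pvKey m1)))),
           uv.2 ++ ((mi.filter (fun m2 => decide (pvKey m1 ≠ pvKey m2) && decide (m1.2.1 = m2.2.1))).map
              (fun m2 => get_id n b (pvDictGet mi (pvKey m2))))) := by
      intro m1 uv
      rw [show (fun (uv : List Int × List Int) m2 =>
          if pvKey m1 = pvKey m2 then uv
          else if m1.2.1 = m2.2.1 then
            (uv.1 ++ [get_id n b (pvDictGet mi (pvKey m1))],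
             uv.2 ++ [get_id n b (pvDictGet mi (pvKey m2))])
          else uv)
        = (fun uv m2 =>
            if (decide (pvKey m1 ≠ pvKey m2) && decide (m1.2.1 = m2.2.1)) then
              (uv.1 ++ [(fun _ => get_id n b (pvDictGet mi (pvKey m1))) m2],
               uv.2 ++ [(fun m2 => get_id n b (pvDictGet mi (pvKey m2))) m2])
            else uv) from ?_]
      · exact pv_foldl_pair_append_if _ _ _ mi uv
      · funext uv m2
        by_cases h1 : pvKey m1 = pvKey m2 <;> by_cases h2 : m1.2.1 = m2.2.1 <;> simp [h1, h2]
    calc mi.foldl _ uv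
        = mi.foldl (fun uv m1 =>
            (uv.1 ++ ((mi.filter (fun m2 => decide (pvKey m1 ≠ pvKey m2) && decide (m1.2.1 = m2.2.1))).map
                (fun _ => get_id n b (pvDictGet mi (pvKey m1)))),
             uv.2 ++ ((mi.filter (fun m2 => decide (pvKey m1 ≠ pvKey m2) && decide (m1.2.1 = m2.2.1))).map
                (fun m2 => get_id n b (pvDictGet mi (pvKey m2)))))) uv := by
          exact pv_foldl_congr _ _ _ _ (by intro uv' m1 _; exact hstep m1 uv')
      _ = _ := pv_foldl_pair_append _ _ mi uv
  have hB : ∀ uv : List Int × List Int,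
      (PySem.List.enumerate mi).foldl (fun uv p =>
        (((pvGroups mi).getD p.2.2.1 []).foldl (fun uv q =>
          if q.1 ≠ p.1 then (uv.1 ++ [n * b + p.2.2.2.2], uv.2 ++ [n * b + q.2]) else uv) uv)) uv
      = (uv.1 ++ (PySem.List.enumerate mi).flatMap (fun p =>
            (((pvGroups mi).getD p.2.2.1 []).filter (fun q => decide (q.1 ≠ p.1))).map
              (fun _ => n * b + p.2.2.2.2)),
         uv.2 ++ (PySem.List.enumerate mi).flatMap (fun p =>
            (((pvGroups mi).getD p.2.2.1 []).filter (fun q => decide (q.1 ≠ p.1))).map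
              (fun q => n * b + q.2))) := by
    intro uv
    calc (PySem.List.enumerate mi).foldl _ uv
        = (PySem.List.enumerate mi).foldl (fun uv p =>
            (uv.1 ++ (((pvGroups mi).getD p.2.2.1 []).filter (fun q => decide (q.1 ≠ p.1))).map
                (fun _ => n * b + p.2.2.2.2),
             uv.2 ++ (((pvGroups mi).getD p.2.2.1 []).filter (fun q => decide (q.1 ≠ p.1))).map
                (fun q => n * b + q.2))) uv := by
          refine pv_foldl_congr _ _ _ _ ?_
          intro uv' p _
          exact pv_foldl_pair_append_ite (fun (q : Int × Int) => q.1 ≠ p.1) _ _ _ uv'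
      _ = _ := pv_foldl_pair_append _ _ _ uv
  rw [hA uv, hB uv]
  have hF : mi.flatMap (fun m1 =>
        ((mi.filter (fun m2 => decide (pvKey m1 ≠ pvKey m2) && decide (m1.2.1 = m2.2.1))).map
          (fun _ => get_id n b (pvDictGet mi (pvKey m1)))))
      = (PySem.List.enumerate mi).flatMap (fun p =>
          (((pvGroups mi).getD p.2.2.1 []).filter (fun q => decide (q.1 ≠ p.1))).map
            (fun _ => n * b + p.2.2.2.2)) := by
    rw [pv_flatMap_snd_enum]
    apply pv_flatMap_congr
    intro p hp
    rcases (PySem.List.mem_enumerate_iff _ _ _).mp hp with ⟨j, hj, rfl⟩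
    simpa only [zero_add] using pv_elem_F n b mi hnd hj
  have hG : mi.flatMap (fun m1 =>
        ((mi.filter (fun m2 => decide (pvKey m1 ≠ pvKey m2) && decide (m1.2.1 = m2.2.1))).map
          (fun m2 => get_id n b (pvDictGet mi (pvKey m2)))))
      = (PySem.List.enumerate mi).flatMap (fun p =>
          (((pvGroups mi).getD p.2.2.1 []).filter (fun q => decide (q.1 ≠ p.1))).map
            (fun q => n * b + q.2)) := by
    rw [pv_flatMap_snd_enum]
    apply pv_flatMap_congr
    intro p hp
    rcases (PySem.List.mem_enumerate_iff _ _ _).mp hp with ⟨j, hj, rfl⟩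
    simpa only [zero_add] using pv_elem_G n b mi hnd hj
  rw [hF, hG]

-- ===== VERDICT (by name: the statement is the Claim_ definition above) =====
theorem get_mention_to_mention_edges_spec : Claim_equal_get_mention_to_mention_edges := by
  intro n lmi _hdom hpre
  unfold Spec_get_mention_to_mention_edges get_mention_to_mention_edges get_mention_to_mention_edges_alt
  refine pv_foldl_congr _ _ _ _ ?_
  intro uv b hb
  rcases (PySem.List.mem_enumerate_iff _ _ _).mp hb with ⟨j, hj, rfl⟩
  exact pv_batch_eq n _ _ (hpre _ (List.getElem_mem hj)) uv
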